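-- pv_equiv track=rewrite | github.com/M-Hassan-Raza/Pocket-AES-Decryption | main.py | sub_nibbles_func
-- ===== SOURCE A (Python) =====
-- INVERSE_SUBSTITUTION_BOX = {
--     "1010": "0000",
--     "0000": "0001",
--     "1001": "0010",
--     "1110": "0011",
--     "0110": "0100",
--     "0011": "0101",
--     "1111": "0110",
--     "0101": "0111",
--     "0001": "1000",
--     "1101": "1001",
--     "1100": "1010",
--     "0111": "1011",
--     "1011": "1100",
--     "0100": "1101",
--     "0010": "1110",
--     "1000": "1111",
-- }
--
-- def sub_nibbles_func(binary_value):
--     """This function performs the substitution of nibbles."""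
--     sub_nibbles_data = []
--     # Check if the input is 4 bits or 16 bits
--     if len(binary_value) == 4:
--         # Input is already a 4-bit nibble
--         sub_nibbles_data.append(INVERSE_SUBSTITUTION_BOX[binary_value])
--     elif len(binary_value) == 16:
--         # Input is a 16-bit binary value, split it into 4-bit nibbles
--         for i in range(0, 16, 4):
--             sub_nibbles_data.append(
--                 INVERSE_SUBSTITUTION_BOX[binary_value[i : i + 4]]
--             )
--     else:
--         raise ValueError("Input length must be either 4 or 16 bits")
--
--     hexadecimal_values = []
--
--     for binary_value in sub_nibbles_data:
--         # Convert the binary to an integer and then to a hexadecimal nibble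
--         hex_value = hex(int(binary_value, 2))[2:]
--
--         # Append the hexadecimal nibble to the list
--         hexadecimal_values.append(hex_value)
--
--     return hexadecimal_values
-- ===== SOURCE B (Python) =====
-- # No dictionary and no substring slicing: a single left-to-right pass accumulates each
-- # nibble's integer value bit by bit and indexes a 16-char string of final hex digits.
-- INV_SBOX_HEX = "18e5d74bf20ca936"
--
-- def sub_nibbles_func(binary_value):
--     if len(binary_value) not in (4, 16):
--         raise ValueError("Input length must be either 4 or 16 bits")
--     out = []
--     v = 0
--     for k, ch in enumerate(binary_value, 1):
--         v = (v << 1) | (ch == "1")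
--         if k % 4 == 0:
--             out.append(INV_SBOX_HEX[v])
--             v = 0
--     return out
-- ===== Notes on version B (the rewrite author's own statement) =====
-- stated objective: alternative
-- what changed: B drops the string-keyed S-box dict and slicing entirely: one left-to-right pass accumulates each nibble's integer value bit by bit ((v<<1)|bit) and indexes a 16-character string of final hex digits, replacing A's length-specific slicing branches, dict lookup of 4-char substrings, and second int/hex conversion loop.
-- outside the precondition, e.g. on sub_nibbles_func('0'): A raises ValueError, B raises ValueError; on sub_nibbles_func('1'): A raises ValueError, B raises ValueError
import Mathlib
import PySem

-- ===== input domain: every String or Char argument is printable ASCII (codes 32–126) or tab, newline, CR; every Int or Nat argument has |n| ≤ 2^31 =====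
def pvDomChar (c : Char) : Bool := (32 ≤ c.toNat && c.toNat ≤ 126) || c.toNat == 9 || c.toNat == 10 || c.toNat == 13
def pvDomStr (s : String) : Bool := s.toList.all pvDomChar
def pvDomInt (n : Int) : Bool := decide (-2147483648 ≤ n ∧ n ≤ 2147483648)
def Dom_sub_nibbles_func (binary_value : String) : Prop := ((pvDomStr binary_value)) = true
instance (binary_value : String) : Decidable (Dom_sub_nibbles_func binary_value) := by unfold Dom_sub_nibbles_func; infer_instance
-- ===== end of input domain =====

-- B replaces A's substring-slicing + dict lookup + second hex-conversion loop by one bitwise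
-- pass that accumulates each nibble's integer value and indexes a hex-digit string (alternative).


-- ===== PORT A =====
def pvInvBox : PySem.Dict String String := PySem.Dict.ofList [
  ("1010", "0000"), ("0000", "0001"), ("1001", "0010"), ("1110", "0011"),
  ("0110", "0100"), ("0011", "0101"), ("1111", "0110"), ("0101", "0111"),
  ("0001", "1000"), ("1101", "1001"), ("1100", "1010"), ("0111", "1011"),
  ("1011", "1100"), ("0100", "1101"), ("0010", "1110"), ("1000", "1111")]

def pvHexDigit (n : Nat) : Char :=
  if n < 10 then Char.ofNat (48 + n) else Char.ofNat (87 + n)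

-- hand port of the digit loop behind hex(n) (no PySem primitive); the fuel argument only
-- makes the same computation structurally total (n has at most n base-16 digits).
def pvHexChars (fuel : Nat) (n : Nat) : List Char :=
  match fuel with
  | 0 => []
  | fuel + 1 => if n = 0 then [] else pvHexChars fuel (n / 16) ++ [pvHexDigit (n % 16)]

-- hex(n)[2:] for 0 ≤ n: exact, since Python's hex(n) for n ≥ 0 is "0x" + lowercase base-16 digits
def pvHexStripped (n : Int) : String :=
  if n = 0 then "0" else String.ofList (pvHexChars n.toNat n.toNat)

-- hex(int(b, 2))[2:]  (int(b, 2) never fails on A's box values, so the ValueError arm is unreachable)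
def pvHexStep (b : String) : String :=
  pvHexStripped ((PySem.Int.ofStrBase? b 2).getD 0)

def sub_nibbles_func (binary_value : String) : List String :=
  let subData : List String :=
    if binary_value.toList.length = 4 then
      [(pvInvBox.get? binary_value).getD ""]          -- KeyError (get? = none) is excluded by Pre_
    else if binary_value.toList.length = 16 then
      (PySem.List.pyRange 0 16 4).foldl (fun acc i =>
        acc ++ [(pvInvBox.get? (String.ofList
            (PySem.List.slice binary_value.toList (some i) (some (i + 4))))).getD ""]) []
    else []                                            -- ValueError is excluded by Pre_
  subData.foldl (fun acc b => acc ++ [pvHexStep b]) []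

-- ===== PORT B =====
def pvInvSboxHex : List Char := "18e5d74bf20ca936".toList

-- one step of B's loop body on state (out, v, k): v = (v << 1) | bit; emit a digit every 4th bit
def pvStep (st : List String × Nat × Nat) (ch : Char) : List String × Nat × Nat :=
  let v := st.2.1 * 2 + (if ch = '1' then 1 else 0)
  let k := st.2.2 + 1
  if k % 4 = 0 then (st.1 ++ [String.ofList [pvInvSboxHex.getD v ' ']], 0, k)
  else (st.1, v, k)

def sub_nibbles_func_alt (binary_value : String) : List String :=
  -- B's ValueError guard (length ∉ {4, 16}) is excluded by Pre_
  (binary_value.toList.foldl pvStep ([], 0, 0)).1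

-- ===== PRECONDITION & SPEC =====
-- Pre_ is exactly where A returns: length 4 or 16 (otherwise ValueError) and every
-- character '0'/'1' (otherwise KeyError on the S-box lookup).
def Pre_sub_nibbles_func (binary_value : String) : Prop :=
  (binary_value.toList.length = 4 ∨ binary_value.toList.length = 16) ∧
  binary_value.toList.all (fun c => c == '0' || c == '1') = true
instance (binary_value : String) : Decidable (Pre_sub_nibbles_func binary_value) := by
  unfold Pre_sub_nibbles_func; infer_instance

def pvWitness_sub_nibbles_func : String := "0110"

def Spec_sub_nibbles_func (binary_value : String) (out : List String) : Prop := out = sub_nibbles_func_alt binary_value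
instance (binary_value : String) (out : List String) : Decidable (Spec_sub_nibbles_func binary_value out) := by unfold Spec_sub_nibbles_func; infer_instance

-- ===== CLAIM (what is proved, stated in full; the proofs are below) =====
def Claim_equal_sub_nibbles_func : Prop := ∀ (binary_value : String), Dom_sub_nibbles_func binary_value → Pre_sub_nibbles_func binary_value → Spec_sub_nibbles_func binary_value (sub_nibbles_func binary_value)

-- ===== LEMMAS AND PROOFS =====

-- the value of B's full nibble after four bit-accumulation steps, rendered as a hex digit
def pvNibbleOut (a b c d : Char) : String :=
  String.ofList [pvInvSboxHex.getD
    ((((if a = '1' then 1 else 0) * 2 + (if b = '1' then 1 else 0)) * 2 +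
        (if c = '1' then 1 else 0)) * 2 + (if d = '1' then 1 else 0)) ' ']

-- B's fold over one 4-bit group: appends exactly one digit and resets v
lemma pv_fold_nibble (a b c d : Char) (acc : List String) (k : Nat) (hk : k % 4 = 0) :
    List.foldl pvStep (acc, 0, k) [a, b, c, d] = (acc ++ [pvNibbleOut a b c d], 0, k + 4) := by
  have h1 : (k + 1) % 4 ≠ 0 := by omega
  have h2 : (k + 1 + 1) % 4 ≠ 0 := by omega
  have h3 : (k + 1 + 1 + 1) % 4 ≠ 0 := by omega
  have h4 : (k + 1 + 1 + 1 + 1) % 4 = 0 := by omega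
  have e : k + 1 + 1 + 1 + 1 = k + 4 := by omega
  simp only [List.foldl_cons, List.foldl_nil, pvStep, if_neg h1, if_neg h2, if_neg h3,
    if_pos h4, pvNibbleOut, Nat.zero_mul, Nat.zero_add, e]

-- per-nibble agreement: A's box-then-hex pipeline equals B's accumulated digit
lemma pv_nibble_eq (a b c d : Char)
    (ha : a = '0' ∨ a = '1') (hb : b = '0' ∨ b = '1')
    (hc : c = '0' ∨ c = '1') (hd : d = '0' ∨ d = '1') :
    pvHexStep ((pvInvBox.get? (String.ofList [a, b, c, d])).getD "") = pvNibbleOut a b c d := by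
  rcases ha with rfl | rfl <;> rcases hb with rfl | rfl <;>
    rcases hc with rfl | rfl <;> rcases hd with rfl | rfl <;> decide

-- ===== VERDICT (by name: the statement is the Claim_ definition above) =====
theorem sub_nibbles_func_spec : Claim_equal_sub_nibbles_func := by
  intro s _ hpre
  obtain ⟨hlen, hbin⟩ := hpre
  unfold Spec_sub_nibbles_func sub_nibbles_func sub_nibbles_func_alt
  rcases hlen with hL | hL
  · rcases hl : s.toList with _ | ⟨a1, _ | ⟨a2, _ | ⟨a3, _ | ⟨a4, _ | ⟨a5, t⟩⟩⟩⟩⟩ <;>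
      rw [hl] at hL <;> simp at hL
    rw [hl] at hbin
    simp only [List.all_cons, List.all_nil, Bool.and_eq_true, Bool.or_eq_true, beq_iff_eq,
      and_true] at hbin
    obtain ⟨h1, h2, h3, h4⟩ := hbin
    have hs : s = String.ofList [a1, a2, a3, a4] := by
      have := congrArg String.ofList hl
      rwa [String.ofList_toList] at this
    have hB := pv_fold_nibble a1 a2 a3 a4 [] 0 rfl
    simp only [hB, List.length_cons, List.length_nil]
    norm_num
    rw [hs, pv_nibble_eq a1 a2 a3 a4 h1 h2 h3 h4]
  · rcases hl : s.toList with _ | ⟨a1, _ | ⟨a2, _ | ⟨a3, _ | ⟨a4, _ | ⟨a5, _ | ⟨a6, _ | ⟨a7, _ |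
      ⟨a8, _ | ⟨a9, _ | ⟨a10, _ | ⟨a11, _ | ⟨a12, _ | ⟨a13, _ | ⟨a14, _ | ⟨a15, _ |
      ⟨a16, _ | ⟨a17, t⟩⟩⟩⟩⟩⟩⟩⟩⟩⟩⟩⟩⟩⟩⟩⟩⟩ <;> rw [hl] at hL <;> simp at hL
    rw [hl] at hbin
    simp only [List.all_cons, List.all_nil, Bool.and_eq_true, Bool.or_eq_true, beq_iff_eq,
      and_true] at hbin
    obtain ⟨h1, h2, h3, h4, h5, h6, h7, h8, h9, h10, h11, h12, h13, h14, h15, h16⟩ := hbin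
    have hB : List.foldl pvStep ([], 0, 0)
        [a1, a2, a3, a4, a5, a6, a7, a8, a9, a10, a11, a12, a13, a14, a15, a16] =
        ([pvNibbleOut a1 a2 a3 a4, pvNibbleOut a5 a6 a7 a8, pvNibbleOut a9 a10 a11 a12,
          pvNibbleOut a13 a14 a15 a16], 0, 16) := by
      rw [show ([a1, a2, a3, a4, a5, a6, a7, a8, a9, a10, a11, a12, a13, a14, a15, a16] : List Char)
          = [a1, a2, a3, a4] ++ ([a5, a6, a7, a8] ++ ([a9, a10, a11, a12] ++ [a13, a14, a15, a16]))
          from rfl]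
      rw [List.foldl_append, pv_fold_nibble a1 a2 a3 a4 [] 0 rfl]
      rw [List.foldl_append, pv_fold_nibble a5 a6 a7 a8 _ 4 rfl]
      rw [List.foldl_append, pv_fold_nibble a9 a10 a11 a12 _ 8 rfl]
      rw [pv_fold_nibble a13 a14 a15 a16 _ 12 rfl]
      rfl
    have hr : PySem.List.pyRange (0 : Int) 16 4 = [(0 : Int), 4, 8, 12] := by decide
    simp only [hB, List.length_cons, List.length_nil]
    norm_num [hr]
    have t0 : PySem.List.slice
        [a1, a2, a3, a4, a5, a6, a7, a8, a9, a10, a11, a12, a13, a14, a15, a16]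
        none (some 4) = [a1, a2, a3, a4] := by
      rw [show (4 : Int) = ((4 : Nat) : Int) from rfl, PySem.List.slice_to_natCast]
      rfl
    have t4 : PySem.List.slice
        [a1, a2, a3, a4, a5, a6, a7, a8, a9, a10, a11, a12, a13, a14, a15, a16]
        (some 4) (some 8) = [a5, a6, a7, a8] := by
      rw [show (4 : Int) = ((4 : Nat) : Int) from rfl,
        show (8 : Int) = ((8 : Nat) : Int) from rfl, PySem.List.slice_natCast]
      rfl
    have t8 : PySem.List.slice
        [a1, a2, a3, a4, a5, a6, a7, a8, a9, a10, a11, a12, a13, a14, a15, a16]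
        (some 8) (some 12) = [a9, a10, a11, a12] := by
      rw [show (8 : Int) = ((8 : Nat) : Int) from rfl,
        show (12 : Int) = ((12 : Nat) : Int) from rfl, PySem.List.slice_natCast]
      rfl
    have t12 : PySem.List.slice
        [a1, a2, a3, a4, a5, a6, a7, a8, a9, a10, a11, a12, a13, a14, a15, a16]
        (some 12) (some 16) = [a13, a14, a15, a16] := by
      rw [show (12 : Int) = ((12 : Nat) : Int) from rfl,
        show (16 : Int) = ((16 : Nat) : Int) from rfl, PySem.List.slice_natCast]
      rfl
    rw [t0, t4, t8, t12]
    exact ⟨pv_nibble_eq a1 a2 a3 a4 h1 h2 h3 h4, pv_nibble_eq a5 a6 a7 a8 h5 h6 h7 h8,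
      pv_nibble_eq a9 a10 a11 a12 h9 h10 h11 h12, pv_nibble_eq a13 a14 a15 a16 h13 h14 h15 h16⟩
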